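-- pv_equiv track=rewrite | github.com/kezarmader/pythonPractice | presufStringReplace.py | Solution
-- ===== SOURCE A (Python) =====
-- class Trie:
--     def __init__(self):
--         self.trie = {}
--
--     def addWord(self, word):
--         trav = self.trie
--         for c in word:
--             if c not in trav:
--                 trav[c] = {}
--             trav = trav[c]
--         trav['#'] = {}
--
--     def findWord(self, word):
--         trav = self.trie
--
--         for c in word:
--             if c in trav:
--                 trav = trav[c]
--             else:
--                 return False
--
--         if '#' in trav:
--             return True
--
--         return False
--     def exists(self, char):
--         return char in self.trie
--
-- def Solution(text, findWordList):
--     trie = Trie()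
--     consLen = 0
--     for word in findWordList:
--         trie.addWord(word)
--         consLen = len(word)
--
--     result = []
--     i = 0
--     while i < len(text):
--         if trie.exists(text[i]):
--             if trie.findWord(text[i:i + consLen]):
--                 result.append('$')
--                 result.append(text[i:i + consLen])
--                 result.append('@')
--                 i += consLen
--                 continue
--
--         result.append(text[i])
--         i += 1
--
--     return ''.join(result)
-- ===== SOURCE B (Python) =====
-- def Solution(text, findWordList):
--     words = set(findWordList)
--     winLen = len(findWordList[-1]) if findWordList else 0
--     if winLen == 0:
--         return text
--     out = []
--     i = 0
--     n = len(text)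
--     while i < n:
--         chunk = text[i:i + winLen]
--         if chunk in words:
--             out.append('$' + chunk + '@')
--             i += winLen
--         else:
--             out.append(text[i])
--             i += 1
--     return ''.join(out)
-- ===== Notes on version B (the rewrite author's own statement) =====
-- stated objective: simpler
-- what changed: B drops the nested-dict trie and its per-position character-by-character walks entirely: it puts the search words in one hash set and scans the text testing each window with a single set lookup; Pre_ excludes word lists containing the character '#' when the text can reach the trie at all (A's trie uses '#' as its terminator sentinel, so such words make A's accepted set an artefact of the encoding) and the inputs on which A loops forever (empty last word together with a text character that keys the trie root).
-- outside the precondition, e.g. on Solution('ab', ['ab#']): A returns '$ab@', B returns 'ab'; on Solution('a', ['a', '']): A does not finish within the time limit, B returns 'a'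
import Mathlib
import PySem

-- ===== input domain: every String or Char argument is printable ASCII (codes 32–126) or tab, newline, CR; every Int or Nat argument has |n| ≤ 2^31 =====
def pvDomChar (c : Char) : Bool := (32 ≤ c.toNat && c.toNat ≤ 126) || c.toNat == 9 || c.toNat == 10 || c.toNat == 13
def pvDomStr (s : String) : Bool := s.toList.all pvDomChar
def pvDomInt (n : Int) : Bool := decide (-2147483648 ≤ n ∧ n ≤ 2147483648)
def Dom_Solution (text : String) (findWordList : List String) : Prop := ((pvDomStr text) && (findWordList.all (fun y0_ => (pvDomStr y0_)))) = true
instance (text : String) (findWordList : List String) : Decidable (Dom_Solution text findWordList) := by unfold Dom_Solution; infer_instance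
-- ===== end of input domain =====

-- B replaces A's hand-built nested-dict trie (built word by word, walked character
-- by character at every text position) by a hash set of the search words tested
-- with one membership lookup per window; objective: simpler.

-- ===== PORT A =====
-- A's trie is a nested dict-of-dicts used only through key-membership tests and
-- key insertion/overwrite.  It is ported EXACTLY as the set of key paths present
-- in that nested dict (a dict node is its set of keys; `c in trav` at node `path`
-- is `path ++ [c] ∈ t`; `trav = trav[c]` is `path := path ++ [c]`; the final
-- assignment `trav['#'] = {}` replaces the subtree below `path ++ ['#']` with an
-- empty dict, i.e. removes every strictly longer stored path below it and makes
-- `path ++ ['#']` itself present): every membership test, insertion and overwrite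
-- of A is performed step for step on this representation.

-- Trie.addWord: walk `word`, inserting each missing key on the way, then the
-- assignment trav['#'] = {}.
def trieAddGo (t : List (List Char)) (path : List Char) (word : List Char) : List (List Char) :=
  match word with
  | [] =>
      let t' := t.filter (fun q => !(decide ((path ++ ['#']) <+: q) && decide (q ≠ path ++ ['#'])))
      if path ++ ['#'] ∈ t' then t' else t' ++ [path ++ ['#']]
  | c :: rest =>
      trieAddGo (if path ++ [c] ∈ t then t else t ++ [path ++ [c]]) (path ++ [c]) rest

-- Trie.findWord: walk `word`; on a missing key return False; at the end test '#'.
def trieFindGo (t : List (List Char)) (path : List Char) (word : List Char) : Bool :=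
  match word with
  | [] => decide (path ++ ['#'] ∈ t)
  | c :: rest => if path ++ [c] ∈ t then trieFindGo t (path ++ [c]) rest else false

-- Trie.exists: `char in self.trie` (a root key).
def trieExists (t : List (List Char)) (c : Char) : Bool := decide ([c] ∈ t)

-- A's `while i < len(text)` loop on the remaining characters; `text[i:i+consLen]`
-- at an in-range non-negative i is `List.take consLen` of the remainder and
-- `i += k` is `List.drop k` (exact for these slices).  `fuel` (= len(text) at the
-- call) only makes the recursion total: inside Pre_ every step consumes at least
-- one character, so fuel never runs out (with consLen = 0 a firing match makes
-- the Python loop forever, which Pre_ excludes).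
def solScan (t : List (List Char)) (consLen : Nat) : Nat → List Char → List Char → List Char
  | 0, _, acc => acc
  | _ + 1, [], acc => acc
  | fuel + 1, c :: rest, acc =>
      if trieExists t c then
        if trieFindGo t [] (List.take consLen (c :: rest)) then
          solScan t consLen fuel (List.drop consLen (c :: rest))
            (acc ++ ['$'] ++ List.take consLen (c :: rest) ++ ['@'])
        else solScan t consLen fuel rest (acc ++ [c])
      else solScan t consLen fuel rest (acc ++ [c])

def Solution (text : String) (findWordList : List String) : String :=
  let st := findWordList.foldl
    (fun (st : List (List Char) × Nat) w => (trieAddGo st.1 [] w.toList, w.toList.length))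
    ([], 0)
  String.ofList (solScan st.1 st.2 text.toList.length text.toList [])

-- ===== PORT B =====
-- Source B's `while i < n` loop: one set lookup of the current window per position.
-- `fuel` (= len(text)) only makes the recursion total; winLen ≥ 1 at every call.
def altScan (words : PySem.Set String) (winLen : Nat) : Nat → List Char → List Char → List Char
  | 0, _, acc => acc
  | _ + 1, [], acc => acc
  | fuel + 1, c :: rest, acc =>
      let chunk := List.take winLen (c :: rest)
      if String.ofList chunk ∈ words then
        altScan words winLen fuel (List.drop winLen (c :: rest)) (acc ++ ['$'] ++ chunk ++ ['@'])
      else altScan words winLen fuel rest (acc ++ [c])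

def Solution_alt (text : String) (findWordList : List String) : String :=
  let words := PySem.Set.ofList findWordList
  match findWordList.getLast? with
  | none => text
  | some w =>
      if w.toList.length = 0 then text
      else String.ofList (altScan words w.toList.length text.toList.length text.toList [])

-- ===== PRECONDITION & SPEC =====
-- Pre_ excludes (a) word lists in which some word contains the character '#'
-- while the text can reach the trie at all: A's trie encodes end-of-word as the
-- key '#', so such words collide with the sentinel and A's accepted set (e.g.
-- accepting the prefix of a word cut at its '#') is an artefact of the encoding
-- that no direct word-set implementation matches; and (b) the inputs on which A
-- never returns: when the LAST word is empty A's window length consLen is 0,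
-- and the moment the scan meets a trie root key the match advances by 0
-- characters and A loops forever.  The first disjunct (no character of the text
-- heads any word, so neither program ever matches) keeps inside Pre_ every
-- input on which those corners cannot fire.
def Pre_Solution (text : String) (findWordList : List String) : Prop :=
  (text.toList.all (fun c => findWordList.all (fun w => ((w.toList ++ ['#']).head? != some c)))
   || (findWordList.all (fun w => !(w.toList.contains '#'))
       && (findWordList.isEmpty || !(findWordList.getLast? == some "")))) = true

instance (text : String) (findWordList : List String) : Decidable (Pre_Solution text findWordList) := by
  unfold Pre_Solution; infer_instance

def pvWitness_Solution : String × List String := ("a bc d", ["bc"])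

def Spec_Solution (text : String) (findWordList : List String) (out : String) : Prop :=
  out = Solution_alt text findWordList

instance (text : String) (findWordList : List String) (out : String) : Decidable (Spec_Solution text findWordList out) := by
  unfold Spec_Solution; infer_instance

-- ===== CLAIM (what is proved, stated in full; the proofs are below) =====
def Claim_equal_Solution : Prop := ∀ (text : String) (findWordList : List String), Dom_Solution text findWordList → Pre_Solution text findWordList → Spec_Solution text findWordList (Solution text findWordList)

-- ===== LEMMAS AND PROOFS =====

-- The trie built by A's first loop (the first component of its fold).
def trieBuild (ws : List String) : List (List Char) :=
  ws.foldl (fun t w => trieAddGo t [] w.toList) []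

-- A stored-path set is prefix closed (it represents a tree of nested dicts).
def Closed (t : List (List Char)) : Prop :=
  ∀ p q : List Char, q ∈ t → p ≠ [] → p <+: q → p ∈ t

-- The paths stored in the trie built from '#'-free words: the nonempty prefixes
-- of each word plus each word's terminator path.
def PathsOf (ws : List String) (q : List Char) : Prop :=
  ∃ w ∈ ws, q ≠ [] ∧ (q <+: w.toList ∨ q = w.toList ++ ['#'])

theorem prefix_snoc_iff (q w : List Char) (a : Char) :
    q <+: w ++ [a] ↔ q <+: w ∨ q = w ++ [a] := by
  constructor
  · intro h
    have hlen : q.length ≤ w.length + 1 := by simpa using h.length_le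
    rcases Nat.lt_or_ge q.length (w.length + 1) with hlt | hge
    · left
      have htake : (w ++ [a]).take q.length = q := by
        rw [List.prefix_iff_eq_take] at h; exact h.symm
      have h2 : (w ++ [a]).take q.length = w.take q.length := by
        rw [List.take_append_of_le_length (by omega)]
      rw [h2] at htake
      have := List.take_prefix q.length w
      rw [htake] at this
      exact this
    · right
      exact List.IsPrefix.eq_of_length h (by simp; omega)
  · rintro (h | rfl)
    · exact h.trans ⟨[a], rfl⟩
    · exact List.prefix_refl _

-- addWord: the surviving old paths (those not strictly below path++word++['#'])
-- plus the nonempty prefixes of word ++ ['#'] below `path`.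
theorem mem_trieAddGo (w : List Char) : ∀ (t : List (List Char)) (path q : List Char),
    q ∈ trieAddGo t path w ↔
      (q ∈ t ∧ ¬((path ++ w ++ ['#']) <+: q ∧ q ≠ path ++ w ++ ['#'])) ∨
      (∃ r, r ≠ [] ∧ r <+: (w ++ ['#']) ∧ q = path ++ r) := by
  induction w with
  | nil =>
    intro t path q
    show q ∈ (if path ++ ['#'] ∈ _ then _ else _) ↔ _
    have hnew : (∃ r, r ≠ [] ∧ r <+: (([] : List Char) ++ ['#']) ∧ q = path ++ r) ↔ q = path ++ ['#'] := by
      constructor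
      · rintro ⟨r, hr, hpre, rfl⟩
        have : r = ['#'] := by
          cases r with
          | nil => exact absurd rfl hr
          | cons b r' =>
            simp only [List.nil_append, List.cons_prefix_cons] at hpre
            obtain ⟨rfl, h2⟩ := hpre
            simp [List.prefix_nil.mp h2]
        rw [this]
      · rintro rfl; exact ⟨['#'], by simp, by simp, rfl⟩
    have hfil : ∀ x, x ∈ t.filter (fun q => !(decide ((path ++ ['#']) <+: q) && decide (q ≠ path ++ ['#']))) ↔
        x ∈ t ∧ ¬((path ++ ['#']) <+: x ∧ x ≠ path ++ ['#']) := by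
      intro x; simp [List.mem_filter]; tauto
    rw [hnew]
    split_ifs with hm
    · rw [hfil] at hm ⊢
      simp only [List.append_nil]
      constructor
      · intro h; exact Or.inl h
      · rintro (h | rfl)
        · exact h
        · exact hm
    · rw [List.mem_append]
      rw [hfil]
      simp only [List.append_nil, List.mem_singleton]
  | cons c rest ih =>
    intro t path q
    show q ∈ trieAddGo _ (path ++ [c]) rest ↔ _
    rw [ih]
    have hmem : q ∈ (if path ++ [c] ∈ t then t else t ++ [path ++ [c]]) ↔ q ∈ t ∨ q = path ++ [c] := by
      split_ifs with hm
      · constructor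
        · exact Or.inl
        · rintro (h | rfl)
          · exact h
          · exact hm
      · simp [List.mem_append]
    rw [hmem]
    have hassoc : path ++ [c] ++ rest ++ ['#'] = path ++ (c :: rest) ++ ['#'] := by simp
    have hnotSE : ¬((path ++ (c :: rest) ++ ['#']) <+: (path ++ [c]) ∧ path ++ [c] ≠ path ++ (c :: rest) ++ ['#']) := by
      rintro ⟨hpre, -⟩
      have := hpre.length_le
      simp at this
    have hnew : (∃ r, r ≠ [] ∧ r <+: (c :: rest ++ ['#']) ∧ q = path ++ r) ↔
        q = path ++ [c] ∨ (∃ r, r ≠ [] ∧ r <+: (rest ++ ['#']) ∧ q = path ++ [c] ++ r) := by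
      constructor
      · rintro ⟨r, hr, hpre, rfl⟩
        cases r with
        | nil => exact absurd rfl hr
        | cons b r' =>
          rw [show (c :: rest ++ ['#']) = c :: (rest ++ ['#']) by simp, List.cons_prefix_cons] at hpre
          obtain ⟨rfl, hpre'⟩ := hpre
          by_cases hr' : r' = []
          · subst hr'; exact Or.inl rfl
          · exact Or.inr ⟨r', hr', hpre', by simp⟩
      · rintro (rfl | ⟨r, hr, hpre, rfl⟩)
        · exact ⟨[c], by simp, ⟨rest ++ ['#'], by simp⟩, rfl⟩
        · exact ⟨c :: r, by simp, by simpa [List.cons_prefix_cons] using hpre, by simp⟩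
    rw [hassoc, hnew]
    constructor
    · rintro (⟨h | rfl, hse⟩ | hnew')
      · exact Or.inl ⟨h, hse⟩
      · exact Or.inr (Or.inl rfl)
      · exact Or.inr (Or.inr hnew')
    · rintro (⟨h, hse⟩ | rfl | hnew')
      · exact Or.inl ⟨Or.inl h, hse⟩
      · exact Or.inl ⟨Or.inr rfl, hnotSE⟩
      · exact Or.inr hnew'

-- One addWord step on a trie of '#'-free words: no old path is ever strictly
-- below the new terminator, so the filter deletes nothing and the stored paths
-- grow exactly by the nonempty prefixes of w and w's terminator path.
theorem mem_trieAddGo_char (t : List (List Char)) (seen : List String) (w : String)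
    (hseen : ∀ v ∈ seen, '#' ∉ v.toList) (hw : '#' ∉ w.toList)
    (hchar : ∀ q, q ∈ t ↔ PathsOf seen q) :
    ∀ q, q ∈ trieAddGo t [] w.toList ↔ PathsOf (seen ++ [w]) q := by
  intro q
  rw [mem_trieAddGo]
  simp only [List.nil_append]
  have hnostrict : q ∈ t → ¬((w.toList ++ ['#']) <+: q ∧ q ≠ w.toList ++ ['#']) := by
    intro hq
    rintro ⟨hpre, hne⟩
    obtain ⟨v, hv, -, hcase⟩ := (hchar q).mp hq
    rcases hcase with hqv | rfl
    · have : '#' ∈ v.toList := (hpre.trans hqv).subset (by simp)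
      exact hseen v hv this
    · rcases (prefix_snoc_iff _ _ _).mp hpre with hpv | heq
      · exact hseen v hv (hpv.subset (by simp))
      · exact hne heq.symm
  have hnew : (∃ r, r ≠ [] ∧ r <+: (w.toList ++ ['#']) ∧ q = r) ↔
      (q ≠ [] ∧ (q <+: w.toList ∨ q = w.toList ++ ['#'])) := by
    constructor
    · rintro ⟨r, hr, hpre, rfl⟩
      exact ⟨hr, (prefix_snoc_iff _ _ _).mp hpre⟩
    · rintro ⟨hq, hc⟩
      exact ⟨q, hq, (prefix_snoc_iff _ _ _).mpr hc, rfl⟩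
  constructor
  · rintro (⟨hq, -⟩ | hr)
    · obtain ⟨v, hv, h1, h2⟩ := (hchar q).mp hq
      exact ⟨v, by simp [hv], h1, h2⟩
    · obtain ⟨hq, hc⟩ := hnew.mp hr
      exact ⟨w, by simp, hq, hc⟩
  · rintro ⟨v, hv, h1, h2⟩
    rcases (List.mem_append.mp hv) with hv' | hv'
    · have hq : q ∈ t := (hchar q).mpr ⟨v, hv', h1, h2⟩
      exact Or.inl ⟨hq, hnostrict hq⟩
    · have : v = w := by simpa using hv'
      subst this
      exact Or.inr (hnew.mpr ⟨h1, h2⟩)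

-- The full characterization of the trie A builds from '#'-free words.
theorem trieBuild_char (ws : List String) (h : ∀ w ∈ ws, '#' ∉ w.toList) :
    ∀ q, q ∈ trieBuild ws ↔ PathsOf ws q := by
  have main : ∀ (l : List String) (t : List (List Char)) (seen : List String),
      (∀ v ∈ seen, '#' ∉ v.toList) → (∀ v ∈ l, '#' ∉ v.toList) →
      (∀ q, q ∈ t ↔ PathsOf seen q) →
      ∀ q, q ∈ l.foldl (fun t w => trieAddGo t [] w.toList) t ↔ PathsOf (seen ++ l) q := by
    intro l
    induction l with
    | nil => intro t seen _ _ hchar q; simpa using hchar q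
    | cons w l ihl =>
      intro t seen hseen hl hchar q
      rw [List.foldl_cons]
      have := ihl (trieAddGo t [] w.toList) (seen ++ [w])
        (by intro v hv; rcases List.mem_append.mp hv with h' | h'
            · exact hseen v h'
            · simpa using (by rw [show v = w by simpa using h']; exact hl w (by simp)))
        (fun v hv => hl v (by simp [hv]))
        (mem_trieAddGo_char t seen w hseen (hl w (by simp)) hchar) q
      simpa using this
  intro q
  have hbase : ∀ r : List Char, r ∈ ([] : List (List Char)) ↔ PathsOf [] r := by
    intro r
    constructor
    · intro hr; simp at hr
    · rintro ⟨v, hv, -⟩; simp at hv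
  have := main ws [] [] (by simp) h hbase q
  simpa [trieBuild] using this

theorem trieBuild_closed (ws : List String) (h : ∀ w ∈ ws, '#' ∉ w.toList) :
    Closed (trieBuild ws) := by
  intro p q hq hp hpq
  rw [trieBuild_char ws h] at hq ⊢
  obtain ⟨v, hv, -, hc⟩ := hq
  rcases hc with hqv | rfl
  · exact ⟨v, hv, hp, Or.inl (hpq.trans hqv)⟩
  · rcases (prefix_snoc_iff _ _ _).mp hpq with hpv | heq
    · exact ⟨v, hv, hp, Or.inl hpv⟩
    · exact ⟨v, hv, hp, Or.inr heq⟩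

-- findWord succeeds iff the '#'-terminated path is stored (by prefix closure).
theorem trieFindGo_iff (t : List (List Char)) (hc : Closed t) (s : List Char) : ∀ path,
    trieFindGo t path s = true ↔ (path ++ s ++ ['#']) ∈ t := by
  induction s with
  | nil => intro path; simp [trieFindGo]
  | cons c rest ih =>
    intro path
    show (if path ++ [c] ∈ t then trieFindGo _ (path ++ [c]) rest else false) = true ↔ _
    split_ifs with hm
    · rw [ih]; constructor <;> (intro h; simpa using h)
    · simp only [false_iff]
      intro h
      exact hm (hc (path ++ [c]) _ h (by simp) ⟨rest ++ ['#'], by simp⟩)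

-- The accept-set bridge: for '#'-free words, the trie accepts a string exactly
-- when it is one of the words (i.e. lies in B's set).
theorem accept_iff (ws : List String) (h : ∀ w ∈ ws, '#' ∉ w.toList) (s : List Char) :
    (s ++ ['#'] ∈ trieBuild ws) ↔ String.ofList s ∈ PySem.Set.ofList ws := by
  rw [trieBuild_char ws h, PySem.Set.mem_ofList]
  constructor
  · rintro ⟨v, hv, -, hc⟩
    rcases hc with hpre | heq
    · exact absurd (hpre.subset (by simp)) (h v hv)
    · have : s = v.toList := List.append_cancel_right heq
      rw [this]; simpa using hv
  · intro hs
    obtain ⟨v, hv, hveq⟩ : ∃ v ∈ ws, v = String.ofList s := ⟨_, hs, rfl⟩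
    refine ⟨v, hv, by simp, Or.inr ?_⟩
    rw [hveq]; simp

-- The two scanning loops agree step for step.
theorem scan_eq (t : List (List Char)) (acc : PySem.Set String)
    (hc : Closed t) (hinv : ∀ s : List Char, (s ++ ['#'] ∈ t ↔ String.ofList s ∈ acc))
    (L : Nat) (hL : 1 ≤ L) :
    ∀ (fuel : Nat) (cs bld : List Char),
      solScan t L fuel cs bld = altScan acc L fuel cs bld := by
  intro fuel
  induction fuel with
  | zero => intro cs bld; rfl
  | succ fuel ih =>
    intro cs bld
    cases cs with
    | nil => rfl
    | cons c rest =>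
      have hcond : (String.ofList (List.take L (c :: rest)) ∈ acc)
          ↔ trieFindGo t [] (List.take L (c :: rest)) = true := by
        rw [trieFindGo_iff t hc, List.nil_append, hinv]
      show solScan t L (fuel + 1) (c :: rest) bld = altScan acc L (fuel + 1) (c :: rest) bld
      by_cases hf : trieFindGo t [] (List.take L (c :: rest)) = true
      · have hex : trieExists t c = true := by
          have hmem := (trieFindGo_iff t hc _ []).mp hf
          rw [List.nil_append] at hmem
          have hcpre : ([c] : List Char) <+: (List.take L (c :: rest) ++ ['#']) := by
            obtain ⟨L', rfl⟩ : ∃ L', L = L' + 1 := ⟨L - 1, by omega⟩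
            rw [List.take_succ_cons]
            exact ⟨List.take L' rest ++ ['#'], by simp⟩
          have := hc [c] _ hmem (by simp) hcpre
          simpa [trieExists] using this
        simp only [solScan, altScan, hex, hf, hcond.mpr hf, if_pos]
        exact ih _ _
      · have hcond' : ¬ (String.ofList (List.take L (c :: rest)) ∈ acc) := fun hx => hf (hcond.mp hx)
        simp only [solScan, altScan, hf, hcond', if_neg, not_false_iff]
        cases hex : trieExists t c
        · simp only [Bool.false_eq_true, if_false]; exact ih _ _
        · simp only [if_true]; exact ih _ _

-- Everything ever stored is a nonempty prefix of some word ++ ['#']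
-- (deletions only remove paths).
theorem mem_trieBuild_imp (ws : List String) (q : List Char) (h : q ∈ trieBuild ws) :
    ∃ w ∈ ws, q ≠ [] ∧ q <+: (w.toList ++ ['#']) := by
  have main : ∀ (l : List String) (t : List (List Char)),
      q ∈ l.foldl (fun t w => trieAddGo t [] w.toList) t →
      q ∈ t ∨ ∃ w ∈ l, q ≠ [] ∧ q <+: (w.toList ++ ['#']) := by
    intro l
    induction l with
    | nil => intro t h; exact Or.inl h
    | cons w l ihl =>
      intro t h
      rw [List.foldl_cons] at h
      rcases ihl _ h with h' | ⟨v, hv, hq, hpre⟩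
      · rw [mem_trieAddGo] at h'
        rcases h' with ⟨h1, -⟩ | ⟨r, hr, hpre, rfl⟩
        · exact Or.inl h1
        · exact Or.inr ⟨w, by simp, by simpa using hr, by simpa using hpre⟩
      · exact Or.inr ⟨v, by simp [hv], hq, hpre⟩
  rcases main ws [] h with h' | h'
  · simp at h'
  · exact h'

-- When no character of the text is a root key, A's loop copies the text unchanged.
theorem solScan_no_trigger (t : List (List Char)) (L : Nat) :
    ∀ (fuel : Nat) (cs acc : List Char), cs.length ≤ fuel →
      (∀ c ∈ cs, trieExists t c = false) → solScan t L fuel cs acc = acc ++ cs := by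
  intro fuel
  induction fuel with
  | zero => intro cs acc h _; simp at h; simp [h, solScan]
  | succ fuel ih =>
    intro cs acc h hex
    cases cs with
    | nil => simp [solScan]
    | cons c rest =>
      show solScan t L (fuel + 1) (c :: rest) acc = _
      simp only [solScan]
      rw [hex c (by simp)]
      simp only [Bool.false_eq_true, if_false]
      rw [ih rest (acc ++ [c]) (by simpa using Nat.lt_succ_iff.mp (by simpa using h))
        (fun d hd => hex d (by simp [hd]))]
      simp

-- When no character of the text heads a word, B's loop copies the text unchanged.
theorem altScan_no_match (words : PySem.Set String) (L : Nat) (hL : 1 ≤ L) :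
    ∀ (fuel : Nat) (cs acc : List Char), cs.length ≤ fuel →
      (∀ c ∈ cs, ∀ w ∈ words, (w.toList ++ ['#']).head? ≠ some c) →
      altScan words L fuel cs acc = acc ++ cs := by
  intro fuel
  induction fuel with
  | zero => intro cs acc h _; simp at h; simp [h, altScan]
  | succ fuel ih =>
    intro cs acc h hhead
    cases cs with
    | nil => simp [altScan]
    | cons c rest =>
      show altScan words L (fuel + 1) (c :: rest) acc = _
      simp only [altScan]
      have hnot : ¬ (String.ofList (List.take L (c :: rest)) ∈ words) := by
        intro hmem
        obtain ⟨L', rfl⟩ : ∃ L', L = L' + 1 := ⟨L - 1, by omega⟩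
        rw [List.take_succ_cons] at hmem
        refine hhead c (by simp) _ hmem ?_
        simp
      rw [if_neg hnot]
      rw [ih rest (acc ++ [c]) (by simpa using Nat.lt_succ_iff.mp (by simpa using h))
        (fun d hd => hhead d (by simp [hd]))]
      simp

-- A's fold with a pair accumulator is the trie fold paired with the length fold.
theorem foldl_pair (ws : List String) : ∀ (t : List (List Char)) (n : Nat),
    ws.foldl (fun (st : List (List Char) × Nat) w => (trieAddGo st.1 [] w.toList, w.toList.length)) (t, n)
      = (ws.foldl (fun t w => trieAddGo t [] w.toList) t, ws.foldl (fun _ w => w.toList.length) n) := by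
  induction ws with
  | nil => intro t n; rfl
  | cons w ws ih => intro t n; rw [List.foldl_cons, List.foldl_cons, List.foldl_cons]; exact ih _ _

-- consLen after A's first loop is the length of the LAST word.
theorem foldl_const_last (ws : List String) : ∀ (w : String), ws.getLast? = some w →
    ∀ n : Nat, ws.foldl (fun _ x => x.toList.length) n = w.toList.length := by
  induction ws with
  | nil => intro w h; simp at h
  | cons v ws ih =>
    intro w h n
    cases ws with
    | nil => simp at h; simp [h]
    | cons v' ws' =>
      rw [List.getLast?_cons_cons] at h
      rw [List.foldl_cons]
      exact ih w h (v.toList.length)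

-- ===== VERDICT (by name: the statement is the Claim_ definition above) =====
theorem Solution_spec : Claim_equal_Solution := by
  intro text ws _hDom hPreB
  have hPre : (∀ c ∈ text.toList, ∀ w ∈ ws, (w.toList ++ ['#']).head? ≠ some c) ∨
      ((∀ w ∈ ws, '#' ∉ w.toList) ∧ (ws = [] ∨ ws.getLast? ≠ some "")) := by
    unfold Pre_Solution at hPreB
    simp only [Bool.or_eq_true, Bool.and_eq_true, List.all_eq_true, bne_iff_ne, ne_eq,
      Bool.not_eq_true', List.contains_eq_mem, decide_eq_false_iff_not, List.isEmpty_iff,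
      beq_eq_false_iff_ne] at hPreB
    tauto
  show Solution text ws = Solution_alt text ws
  unfold Solution Solution_alt
  rw [foldl_pair]
  rw [show List.foldl (fun t w => trieAddGo t [] w.toList) [] ws = trieBuild ws from rfl]
  have hAtext : (∀ c ∈ text.toList, ∀ v ∈ ws, (v.toList ++ ['#']).head? ≠ some c) →
      String.ofList (solScan (trieBuild ws) (ws.foldl (fun _ w => w.toList.length) 0)
        text.toList.length text.toList []) = text := by
    intro hpre3
    have hnotrig : ∀ c ∈ text.toList, trieExists (trieBuild ws) c = false := by
      intro c hc
      rw [trieExists, decide_eq_false_iff_not]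
      intro hmem
      obtain ⟨v, hv, -, hpre⟩ := mem_trieBuild_imp ws [c] hmem
      obtain ⟨tl, htl⟩ := hpre
      exact hpre3 c hc v hv (by rw [← htl]; simp)
    rw [solScan_no_trigger _ _ _ _ _ (le_refl _) hnotrig]
    simp
  rcases hPre with hNoTrig | ⟨hHash, hLast⟩
  · -- no character of the text keys the trie root: both sides copy the text.
    rw [hAtext hNoTrig]
    cases hws : ws.getLast? with
    | none => rfl
    | some w =>
      by_cases hwz : w.toList.length = 0
      · simp only; rw [if_pos hwz]
      · simp only; rw [if_neg hwz]
        rw [altScan_no_match (PySem.Set.ofList ws) w.toList.length (by omega)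
          text.toList.length text.toList [] (le_refl _)
          (fun c hc v hv => hNoTrig c hc v ((PySem.Set.mem_ofList ws v).mp hv))]
        simp
  · cases hws : ws.getLast? with
    | none =>
      have hnil : ws = [] := by simpa using hws
      subst hnil
      rw [hAtext (by simp)]
    | some w =>
      have hwne : w ≠ "" := by
        rcases hLast with rfl | hne
        · simp at hws
        · intro h; exact hne (h ▸ hws)
      have hwz : w.toList.length ≠ 0 := by
        intro h
        exact hwne (String.toList_eq_nil_iff.mp (List.length_eq_zero_iff.mp h))
      simp only
      rw [foldl_const_last ws w hws 0]
      rw [if_neg hwz]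
      rw [scan_eq (trieBuild ws) _ (trieBuild_closed ws hHash) (accept_iff ws hHash) _ (by omega)]
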